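-- pv_equiv track=rewrite | github.com/danking14/DK-MIT-6-0001 | ps2/scratch2.py | greater_elements
-- ===== SOURCE A (Python) =====
-- def greater_elements(elements):
--     if not elements:
--         return []
--     if not elements[1:]:
--         return elements
--     max_previous = max(elements[:-1])
--     if elements[-1] > max_previous:
--         return greater_elements(elements[:-1]) + [elements[-1]]
--     else:
--         return greater_elements(elements[:-1])
-- ===== SOURCE B (Python) =====
-- def greater_elements(elements):
--     # single left-to-right pass tracking the running maximum (O(n) vs A's O(n^2))
--     if not elements:
--         return []
--     m = elements[0]
--     out = [m]
--     for y in elements[1:]: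
--         if y > m:
--             out.append(y)
--             m = y
--     return out
-- ===== Notes on version B (the rewrite author's own statement) =====
-- stated objective: faster
-- what changed: Replaced A's right-to-left recursion that recomputes max(elements[:-1]) and reslices the list at every step with a single left-to-right pass that keeps the running maximum and appends each new strict maximum.
import Mathlib
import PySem

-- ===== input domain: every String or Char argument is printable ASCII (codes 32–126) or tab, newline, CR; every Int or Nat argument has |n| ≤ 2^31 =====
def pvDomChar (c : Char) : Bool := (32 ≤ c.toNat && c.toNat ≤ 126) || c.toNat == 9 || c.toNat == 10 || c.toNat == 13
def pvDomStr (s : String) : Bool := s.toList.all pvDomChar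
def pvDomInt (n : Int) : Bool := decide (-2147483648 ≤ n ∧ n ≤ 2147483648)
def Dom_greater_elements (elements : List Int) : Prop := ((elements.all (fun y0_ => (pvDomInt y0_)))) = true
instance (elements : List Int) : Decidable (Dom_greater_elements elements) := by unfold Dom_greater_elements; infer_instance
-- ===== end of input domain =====

-- B replaces A's right-to-left recursion (which recomputes max(elements[:-1]) each step, O(n^2))
-- with one left-to-right pass tracking the running maximum (O(n)); objective: faster.

-- ===== PORT A =====
-- A recurses on elements[:-1]; `.getD 0` defaults are unreachable (the list has ≥ 2 elements there).
def greater_elements (elements : List Int) : List Int :=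
  if elements = [] then []
  else if PySem.List.slice elements (some 1) none = [] then elements
  else
    let init := PySem.List.slice elements none (some (-1))
    let max_previous := ((PySem.List.max? init (fun x => x)).getD 0)
    let last := (PySem.List.pyGet? elements (-1)).getD 0
    if max_previous < last then greater_elements init ++ [last]
    else greater_elements init
termination_by elements.length
decreasing_by
  all_goals
    cases elements with
    | nil => simp_all
    | cons x xs => simp [PySem.List.slice_to_neg_one]

-- ===== PORT B =====
def greater_elements_alt_go (m : Int) : List Int → List Int
  | [] => []
  | y :: ys => if m < y then y :: greater_elements_alt_go y ys else greater_elements_alt_go m ys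

def greater_elements_alt (elements : List Int) : List Int :=
  match elements with
  | [] => []
  | x :: xs => x :: greater_elements_alt_go x xs

-- ===== PRECONDITION & SPEC =====
def Spec_greater_elements (elements : List Int) (out : List Int) : Prop := out = greater_elements_alt elements
instance (elements : List Int) (out : List Int) : Decidable (Spec_greater_elements elements out) := by unfold Spec_greater_elements; infer_instance

-- ===== CLAIM (what is proved, stated in full; the proofs are below) =====
def Claim_equal_greater_elements : Prop := ∀ (elements : List Int), Dom_greater_elements elements → Spec_greater_elements elements (greater_elements elements)

-- ===== LEMMAS AND PROOFS =====

lemma alt_go_append (a m : Int) (ys : List Int) :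
    greater_elements_alt_go m (ys ++ [a])
      = greater_elements_alt_go m ys ++ (if ys.foldl max m < a then [a] else []) := by
  induction ys generalizing m with
  | nil => simp [greater_elements_alt_go]
  | cons y ys ih =>
    simp only [List.cons_append, greater_elements_alt_go, List.foldl_cons]
    by_cases h : m < y
    · simp [h, ih, max_eq_right h.le]
    · simp [h, ih, max_eq_left (not_lt.mp h)]

lemma alt_append (a : Int) (l : List Int) (hl : l ≠ []) :
    greater_elements_alt (l ++ [a])
      = greater_elements_alt l ++ (if l.tail.foldl max (l.headI) < a then [a] else []) := by
  cases l with
  | nil => exact absurd rfl hl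
  | cons x xs => simp [greater_elements_alt, alt_go_append]

lemma A_eq_alt (l : List Int) : greater_elements l = greater_elements_alt l := by
  induction l using List.reverseRecOn with
  | nil => simp [greater_elements, greater_elements_alt]
  | append_singleton l a ih =>
    rw [greater_elements]
    cases l with
    | nil => simp [greater_elements_alt, greater_elements_alt_go, PySem.List.slice_from_one]
    | cons x xs =>
      have hne : (x :: xs) ++ [a] ≠ [] := by simp
      have htail : PySem.List.slice ((x :: xs) ++ [a]) (some 1) none ≠ [] := by
        simp [PySem.List.slice_from_one]
      rw [if_neg hne, if_neg htail]
      simp only [PySem.List.slice_to_neg_one, PySem.List.pyGet?_neg_one_append_singleton,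
        Option.getD_some]
      have hdl : ((x :: xs) ++ [a]).dropLast = x :: xs := by
        rw [List.dropLast_concat]
      rw [hdl, PySem.List.max?_id_cons, Option.getD_some, ih,
        alt_append a (x :: xs) (by simp)]
      by_cases h : xs.foldl max x < a
      · simp [h]
      · simp [h]

-- ===== VERDICT (by name: the statement is the Claim_ definition above) =====
theorem greater_elements_spec : Claim_equal_greater_elements := by
  intro elements _
  exact A_eq_alt elements
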